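-- pv_equiv track=rewrite | github.com/AdamZhouSE/pythonHomework | Code/CodeRecords/2793/48102/244121.py | crazy_computer
-- ===== SOURCE A (Python) =====
-- def crazy_computer(n: int, c: int, seq: list) -> int:
--     if c == 0:
--         return 0
--     count = 0
--     for i in range(n):
--         if (i != n - 1 and seq[i] + c >= seq[i+1]) or i == n-1:
--             count += 1
--         else:
--             count = 0
--     return count
-- ===== SOURCE B (Python) =====
-- def crazy_computer(n: int, c: int, seq: list) -> int:
--     if c == 0 or n <= 0:
--         return 0
--     count = 1
--     i = n - 2
--     while i >= 0 and seq[i] + c >= seq[i + 1]: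
--         count += 1
--         i -= 1
--     return count
-- ===== Notes on version B (the rewrite author's own statement) =====
-- stated objective: alternative
-- what changed: Replaces the forward pass over all n positions with a reset-to-zero counter by a backward scan from the last word that stops at the first gap larger than c, counting only the trailing block.
import Mathlib
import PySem

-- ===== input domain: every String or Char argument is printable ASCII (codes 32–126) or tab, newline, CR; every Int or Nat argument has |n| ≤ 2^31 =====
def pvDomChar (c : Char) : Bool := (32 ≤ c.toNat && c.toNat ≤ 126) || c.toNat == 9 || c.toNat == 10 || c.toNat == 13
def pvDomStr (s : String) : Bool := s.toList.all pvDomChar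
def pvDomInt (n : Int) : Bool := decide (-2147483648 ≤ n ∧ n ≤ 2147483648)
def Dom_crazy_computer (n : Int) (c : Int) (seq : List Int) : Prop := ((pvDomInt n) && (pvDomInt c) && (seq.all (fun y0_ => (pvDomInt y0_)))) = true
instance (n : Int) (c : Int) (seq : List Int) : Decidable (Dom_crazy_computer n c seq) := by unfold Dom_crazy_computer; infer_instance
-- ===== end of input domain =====

-- B counts the trailing block by a backward scan with an early break instead of A's
-- full forward pass with a reset counter; same return value on Pre_ (alternative decomposition).

-- ===== PORT A =====
-- Python's seq[i]/seq[i+1] would raise IndexError out of range; Pre_ restricts to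
-- in-range accesses, so pyGetD with default 0 is exact there.
def crazy_computer (n : Int) (c : Int) (seq : List Int) : Int :=
  if c = 0 then 0
  else
    (PySem.List.pyRange 0 n 1).foldl
      (fun count i =>
        if (i ≠ n - 1 ∧ PySem.List.pyGetD seq i 0 + c ≥ PySem.List.pyGetD seq (i + 1) 0) ∨ i = n - 1
        then count + 1 else 0) 0

-- ===== PORT B =====
-- the 'while i >= 0 and seq[i] + c >= seq[i+1]' countdown loop, fuel = i + 1
def crazyAltRun (c : Int) (seq : List Int) : Nat → Int
  | 0 => 0
  | Nat.succ k =>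
    if PySem.List.pyGetD seq (k : Int) 0 + c ≥ PySem.List.pyGetD seq ((k : Int) + 1) 0
    then 1 + crazyAltRun c seq k else 0

def crazy_computer_alt (n : Int) (c : Int) (seq : List Int) : Int :=
  if c = 0 ∨ n ≤ 0 then 0
  else 1 + crazyAltRun c seq (n - 1).toNat

-- ===== PRECONDITION & SPEC =====
-- Pre_ excludes exactly the inputs where Python A raises IndexError: c ≠ 0 together
-- with n ≥ 2 and n > len(seq) (for c = 0 or n ≤ 1 the loop never indexes the list).
def Pre_crazy_computer (n : Int) (c : Int) (seq : List Int) : Prop :=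
  c = 0 ∨ n ≤ 1 ∨ n ≤ (seq.length : Int)
instance (n : Int) (c : Int) (seq : List Int) : Decidable (Pre_crazy_computer n c seq) := by unfold Pre_crazy_computer; infer_instance

def pvWitness_crazy_computer : Int × Int × List Int := (3, 1, [1, 2, 3])

def Spec_crazy_computer (n : Int) (c : Int) (seq : List Int) (out : Int) : Prop := out = crazy_computer_alt n c seq
instance (n : Int) (c : Int) (seq : List Int) (out : Int) : Decidable (Spec_crazy_computer n c seq out) := by unfold Spec_crazy_computer; infer_instance

-- ===== CLAIM (what is proved, stated in full; the proofs are below) =====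
def Claim_equal_crazy_computer : Prop := ∀ (n : Int) (c : Int) (seq : List Int), Dom_crazy_computer n c seq → Pre_crazy_computer n c seq → Spec_crazy_computer n c seq (crazy_computer n c seq)

-- ===== LEMMAS AND PROOFS =====

-- A's reset-counter fold over indices 0..m-1 (with the i = n-1 branch unreachable)
-- computes exactly B's trailing-run countdown.
theorem crazyRun_eq_foldl (c : Int) (seq : List Int) (m : Nat) :
    (PySem.List.pyRange 0 (m : Int) 1).foldl
      (fun count i =>
        if PySem.List.pyGetD seq i 0 + c ≥ PySem.List.pyGetD seq (i + 1) 0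
        then count + 1 else 0) 0 = crazyAltRun c seq m := by
  induction m with
  | zero => simp [PySem.List.pyRange_one_eq_nil, crazyAltRun]
  | succ k ih =>
    rw [show ((Nat.succ k : Nat) : Int) = (k : Int) + 1 by push_cast; ring,
        PySem.List.pyRange_one_succ_right (by positivity), List.foldl_append]
    simp only [List.foldl, crazyAltRun, ih]
    split_ifs with h
    · ring
    · rfl

theorem crazy_computer_spec : Claim_equal_crazy_computer := by
  intro n c seq _ _
  unfold Spec_crazy_computer crazy_computer crazy_computer_alt
  by_cases hc : c = 0
  · simp [hc]
  · by_cases hn : n ≤ 0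
    · simp [hc, hn, PySem.List.pyRange_one_eq_nil]
    · obtain ⟨m, rfl⟩ : ∃ m : Nat, n = (m : Int) + 1 := ⟨(n - 1).toNat, by omega⟩
      simp only [if_neg hc, if_neg (show ¬(c = 0 ∨ (m : Int) + 1 ≤ 0) by omega),
        add_sub_cancel_right, Int.toNat_natCast]
      rw [PySem.List.pyRange_one_succ_right (by positivity), List.foldl_append]
      simp only [List.foldl]
      rw [if_pos (Or.inr trivial)]
      have hcongr :
          List.foldl
            (fun count i =>
              if i ≠ (m : Int) ∧ PySem.List.pyGetD seq i 0 + c ≥ PySem.List.pyGetD seq (i + 1) 0 ∨ i = (m : Int)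
              then count + 1 else 0)
            (0 : Int) (PySem.List.pyRange 0 (m : Int) 1)
          = List.foldl
            (fun count i =>
              if PySem.List.pyGetD seq i 0 + c ≥ PySem.List.pyGetD seq (i + 1) 0
              then count + 1 else 0)
            (0 : Int) (PySem.List.pyRange 0 (m : Int) 1) := by
        apply PySem.List.foldl_congr_mem
        intro acc x hx
        have hx' := (PySem.List.mem_pyRange_one).1 hx
        have hne : x ≠ (m : Int) := by omega
        simp [hne]
      have hfin := hcongr.trans (crazyRun_eq_foldl c seq m)
      omega
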